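-- pv_equiv track=rewrite | github.com/DonXavierdev/Leetcode-Solutions | 2605. Form Smallest Number From Two Digit Arrays.py | minNumber
-- ===== SOURCE A (Python) =====
-- def minNumber(nums1,nums2):
--         for i in sorted(nums1):
--             if i in nums2:
--                 return i
--         if min(nums1)>min(nums2):
--             return int(str(min(nums2))+str(min(nums1)))
--         else:
--             return int(str(min(nums1))+str(min(nums2)))
-- ===== SOURCE B (Python) =====
-- def minNumber(nums1, nums2):
--     common = set(nums1) & set(nums2)
--     if common:
--         return min(common)
--     a, b = min(nums1), min(nums2)
--     lo, hi = (a, b) if a <= b else (b, a)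
--     return int(str(lo) + str(hi))
-- ===== Notes on version B (the rewrite author's own statement) =====
-- stated objective: simpler
-- what changed: B computes the set intersection once and takes min over it, instead of scanning sorted(nums1) with a per-element membership test and early return; the fallback picks min/max of the two minima directly instead of an if/else on the comparison.
import Mathlib
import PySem

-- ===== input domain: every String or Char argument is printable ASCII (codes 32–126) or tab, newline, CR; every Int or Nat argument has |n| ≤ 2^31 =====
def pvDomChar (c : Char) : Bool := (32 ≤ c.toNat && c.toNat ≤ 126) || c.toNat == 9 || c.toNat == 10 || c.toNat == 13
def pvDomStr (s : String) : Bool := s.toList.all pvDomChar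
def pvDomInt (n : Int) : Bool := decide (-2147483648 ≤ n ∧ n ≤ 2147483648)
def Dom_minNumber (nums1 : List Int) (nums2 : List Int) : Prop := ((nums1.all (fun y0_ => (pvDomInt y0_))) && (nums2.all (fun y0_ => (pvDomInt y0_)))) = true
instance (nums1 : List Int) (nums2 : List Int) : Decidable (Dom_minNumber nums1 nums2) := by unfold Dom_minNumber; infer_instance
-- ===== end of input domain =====

-- B replaces A's scan of sorted(nums1) with a set intersection and a min over it; objective: simpler.


-- ===== PORT A =====
-- 'for i in sorted(nums1): if i in nums2: return i' — early return as an Option-valued scan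
def minNumberScan (xs : List Int) (nums2 : List Int) : Option Int :=
  match xs with
  | [] => none
  | i :: rest => if i ∈ nums2 then some i else minNumberScan rest nums2

def minNumber (nums1 : List Int) (nums2 : List Int) : Int :=
  match minNumberScan (PySem.List.sorted nums1 (fun x => x) false) nums2 with
  | some i => i
  | none =>
    -- min([]) raises and int("-a-b") raises: Pre_ excludes those inputs ('.getD 0' is never reached inside Pre_)
    let m1 := (PySem.List.min? nums1 (fun x => x)).getD 0
    let m2 := (PySem.List.min? nums2 (fun x => x)).getD 0
    if m1 > m2 then (PySem.Int.ofChars? (PySem.Int.toChars m2 ++ PySem.Int.toChars m1)).getD 0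
    else (PySem.Int.ofChars? (PySem.Int.toChars m1 ++ PySem.Int.toChars m2)).getD 0

-- ===== PORT B =====
def minNumber_alt (nums1 : List Int) (nums2 : List Int) : Int :=
  let common : PySem.Set Int := PySem.Set.inter (PySem.Set.ofList nums1) (PySem.Set.ofList nums2)
  if common ≠ [] then
    (PySem.List.min? common (fun x => x)).getD 0
  else
    let a := (PySem.List.min? nums1 (fun x => x)).getD 0
    let b := (PySem.List.min? nums2 (fun x => x)).getD 0
    let lo := if a ≤ b then a else b
    let hi := if a ≤ b then b else a
    (PySem.Int.ofChars? (PySem.Int.toChars lo ++ PySem.Int.toChars hi)).getD 0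

-- ===== PRECONDITION & SPEC =====
-- Pre_ excludes exactly the inputs where A (and B alike) raises: an empty list (ValueError from min),
-- and disjoint lists whose two minima are both negative (int('-a-b') raises ValueError).
def Pre_minNumber (nums1 : List Int) (nums2 : List Int) : Prop :=
  nums1 ≠ [] ∧ nums2 ≠ [] ∧
    ((∃ x ∈ nums1, x ∈ nums2) ∨ (∀ x ∈ nums1, 0 ≤ x) ∨ (∀ x ∈ nums2, 0 ≤ x))
instance (nums1 : List Int) (nums2 : List Int) : Decidable (Pre_minNumber nums1 nums2) := by unfold Pre_minNumber; infer_instance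

def pvWitness_minNumber : List Int × List Int := ([3, 5, 1], [2, 4, 6])

def Spec_minNumber (nums1 : List Int) (nums2 : List Int) (out : Int) : Prop := out = minNumber_alt nums1 nums2
instance (nums1 : List Int) (nums2 : List Int) (out : Int) : Decidable (Spec_minNumber nums1 nums2 out) := by unfold Spec_minNumber; infer_instance

-- ===== CLAIM (what is proved, stated in full; the proofs are below) =====
def Claim_equal_minNumber : Prop := ∀ (nums1 : List Int) (nums2 : List Int), Dom_minNumber nums1 nums2 → Pre_minNumber nums1 nums2 → Spec_minNumber nums1 nums2 (minNumber nums1 nums2)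

-- ===== LEMMAS AND PROOFS =====

-- A's scan is the head of the filtered list
theorem minNumberScan_eq_head (xs nums2 : List Int) :
    minNumberScan xs nums2 = (xs.filter (fun x => decide (x ∈ nums2))).head? := by
  induction xs with
  | nil => rfl
  | cons i rest ih =>
    by_cases h : i ∈ nums2 <;> simp [minNumberScan, h, ih]

theorem mem_common (nums1 nums2 : List Int) (x : Int) :
    x ∈ PySem.Set.inter (PySem.Set.ofList nums1) (PySem.Set.ofList nums2) ↔ x ∈ nums1 ∧ x ∈ nums2 := by
  simp [PySem.Set.inter, List.mem_filter, PySem.Set.mem_ofList, PySem.Set.contains]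

-- ===== VERDICT (by name: the statement is the Claim_ definition above) =====
theorem minNumber_spec : Claim_equal_minNumber := by
  intro nums1 nums2 _ _
  unfold Spec_minNumber minNumber minNumber_alt
  rw [minNumberScan_eq_head]
  set S := PySem.List.sorted nums1 (fun x => x) false with hS
  set F := S.filter (fun x => decide (x ∈ nums2)) with hF
  set C := PySem.Set.inter (PySem.Set.ofList nums1) (PySem.Set.ofList nums2) with hC
  have hmemF : ∀ x, x ∈ F ↔ x ∈ nums1 ∧ x ∈ nums2 := by
    intro x
    simp [hF, List.mem_filter, PySem.List.mem_sorted, hS]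
  have hmemC : ∀ x, x ∈ C ↔ x ∈ nums1 ∧ x ∈ nums2 := fun x => mem_common nums1 nums2 x
  by_cases hFe : F = []
  · -- no common element: C is empty too, both take the fallback
    have hCe : C = [] := by
      rcases List.eq_nil_or_concat C with h | ⟨l, a, h⟩
      · exact h
      · exfalso
        have : a ∈ C := by simp [h]
        have := (hmemC a).mp this
        have : a ∈ F := (hmemF a).mpr this
        simp [hFe] at this
    simp only [hFe, hCe, List.head?_nil, ne_eq, not_true_eq_false, if_false]
    set a := (PySem.List.min? nums1 (fun x => x)).getD 0
    set b := (PySem.List.min? nums2 (fun x => x)).getD 0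
    by_cases hab : a > b
    · have : ¬ (a ≤ b) := by omega
      simp [hab, this]
    · have : a ≤ b := by omega
      simp [hab, this]
  · -- common element exists: head of filtered sorted = min of intersection
    obtain ⟨h, t, hFt⟩ := List.exists_cons_of_ne_nil hFe
    have hCe : C ≠ [] := by
      intro hc
      have : h ∈ F := by simp [hFt]
      have := (hmemF h).mp this
      have : h ∈ C := (hmemC h).mpr this
      simp [hc] at this
    obtain ⟨m, hm⟩ := Option.ne_none_iff_exists'.mp
      ((not_iff_not.mpr (PySem.List.min?_eq_none_iff C (fun x => x))).mpr hCe)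
    simp only [hFt, List.head?_cons, hCe, ne_eq, not_false_eq_true, if_true, hm, Option.getD_some]
    -- h ≤ everything in F (sorted, filter preserves Pairwise), m ≤ everything in C; same member sets
    have hmC : m ∈ C := PySem.List.min?_mem hm
    have hmin : ∀ y ∈ C, m ≤ y := PySem.List.min?_isMin hm
    have hSp : S.Pairwise (fun x y => x ≤ y) := PySem.List.sorted_pairwise nums1 (fun x => x)
    have hFp : F.Pairwise (fun x y => x ≤ y) := List.Pairwise.filter _ hSp
    have hhead : ∀ y ∈ F, h ≤ y := by
      intro y hy
      rw [hFt] at hy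
      rcases List.mem_cons.mp hy with rfl | hy'
      · exact le_refl _
      · rw [hFt] at hFp
        exact (List.pairwise_cons.mp hFp).1 y hy'
    have hhF : h ∈ F := by simp [hFt]
    have h1 : h ≤ m := hhead m ((hmemF m).mpr ((hmemC m).mp hmC))
    have h2 : m ≤ h := hmin h ((hmemC h).mpr ((hmemF h).mp hhF))
    omega
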